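-- pv_equiv track=rewrite | github.com/usemacaw/macaw-openvoice | macaw/alignment/ctc_aligner.py | _text_to_tokens
-- ===== SOURCE A (Python) =====
-- _WORD_SEPARATOR = "|"
--
-- def _text_to_tokens(
--     text: str,
--     label_to_index: dict[str, int],
-- ) -> list[int]:
--     """Convert text to CTC token indices.
--
--     Wav2Vec2 dictionaries use uppercase letters + ``|`` for word separator.
--     Characters not in the dictionary are silently skipped.
--     """
--     normalized = text.upper()
--     tokens: list[int] = []
--     separator_idx = label_to_index.get(_WORD_SEPARATOR)
--
--     for char in normalized:
--         if char == " " and separator_idx is not None: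
--             # Avoid consecutive separators.
--             if not tokens or tokens[-1] != separator_idx:
--                 tokens.append(separator_idx)
--         elif char in label_to_index:
--             tokens.append(label_to_index[char])
--         # Unknown characters (punctuation, digits) are skipped.
--
--     # Strip leading/trailing separators.
--     if tokens and separator_idx is not None:
--         if tokens[0] == separator_idx:
--             tokens = tokens[1:]
--         if tokens and tokens[-1] == separator_idx:
--             tokens = tokens[:-1]
--
--     return tokens
-- ===== SOURCE B (Python) =====
-- _WORD_SEPARATOR = "|"
--
-- def _text_to_tokens(
--     text: str,
--     label_to_index: dict[str, int],
-- ) -> list[int]: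
--     """Split-based re-implementation: words joined with deduplicated separators."""
--     up = text.upper()
--     sep = label_to_index.get(_WORD_SEPARATOR)
--     if sep is None:
--         return [label_to_index[c] for c in up if c in label_to_index]
--     words = up.split(' ')
--     tokens = [label_to_index[c] for c in words[0] if c in label_to_index]
--     for w in words[1:]:
--         if not tokens or tokens[-1] != sep:
--             tokens.append(sep)
--         tokens += [label_to_index[c] for c in w if c in label_to_index]
--     if tokens and tokens[0] == sep:
--         tokens = tokens[1:]
--     if tokens and tokens[-1] == sep:
--         tokens = tokens[:-1]
--     return tokens
-- ===== Notes on version B (the rewrite author's own statement) =====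
-- stated objective: simpler
-- what changed: A's stateful character loop (separator dedup against the last emitted token, then end-stripping) is replaced by splitting the uppercased text on ' ' into words, emitting each word's token group via a filtered comprehension and joining groups with a value-deduplicated separator (flat comprehension when '|' is not in the dictionary).
import Mathlib
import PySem

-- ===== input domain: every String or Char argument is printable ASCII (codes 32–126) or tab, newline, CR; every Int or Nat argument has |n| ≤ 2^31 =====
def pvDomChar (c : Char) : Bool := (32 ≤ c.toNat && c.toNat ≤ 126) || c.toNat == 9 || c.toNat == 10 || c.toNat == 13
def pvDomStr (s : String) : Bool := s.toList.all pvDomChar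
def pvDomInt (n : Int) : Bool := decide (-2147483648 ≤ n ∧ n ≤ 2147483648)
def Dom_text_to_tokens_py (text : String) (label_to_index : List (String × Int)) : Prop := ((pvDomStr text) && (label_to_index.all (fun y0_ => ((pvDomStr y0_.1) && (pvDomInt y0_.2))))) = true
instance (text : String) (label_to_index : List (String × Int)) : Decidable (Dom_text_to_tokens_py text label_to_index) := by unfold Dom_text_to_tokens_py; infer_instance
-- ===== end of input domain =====

-- B rewrites A's stateful character loop as a split-on-space decomposition: per-word token
-- groups joined with (deduplicated) separators; objective: simpler/alternative, not faster.

-- ===== PORT A =====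
-- literal transliteration of A's char loop + final strip
def text_to_tokens_py (text : String) (label_to_index : List (String × Int)) : List Int :=
  let d := PySem.Dict.mk label_to_index
  let normalized := PySem.Str.upper text
  let sepIdx := d.get? "|"
  let tokens := normalized.toList.foldl (fun tokens char =>
    if char = ' ' ∧ sepIdx.isSome then
      -- avoid consecutive separators
      if tokens = [] ∨ PySem.List.pyGet? tokens (-1) ≠ sepIdx then tokens ++ sepIdx.toList else tokens
    else if d.contains (String.ofList [char]) then tokens ++ [d.getD (String.ofList [char]) 0]
    else tokens) []
  -- strip leading/trailing separators
  if tokens ≠ [] ∧ sepIdx.isSome then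
    let tokens2 := if PySem.List.pyGet? tokens 0 = sepIdx then PySem.List.slice tokens (some 1) none else tokens
    if tokens2 ≠ [] ∧ PySem.List.pyGet? tokens2 (-1) = sepIdx then PySem.List.slice tokens2 none (some (-1)) else tokens2
  else tokens

-- ===== PORT B =====
-- [label_to_index[c] for c in w if c in label_to_index]
def pvWordTokens (d : PySem.Dict String Int) (w : List Char) : List Int :=
  (w.filter (fun c => d.contains (String.ofList [c]))).map (fun c => d.getD (String.ofList [c]) 0)

def text_to_tokens_py_alt (text : String) (label_to_index : List (String × Int)) : List Int :=
  let d := PySem.Dict.mk label_to_index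
  let up := (PySem.Str.upper text).toList
  match d.get? "|" with
  | none => pvWordTokens d up
  | some sep =>
    let words := PySem.Chars.splitOn up [' ']
    let tokens := pvWordTokens d (words.headD [])
    let tokens := (words.drop 1).foldl (fun tokens w =>
      (if tokens = [] ∨ tokens.getLast? ≠ some sep then tokens ++ [sep] else tokens)
        ++ pvWordTokens d w) tokens
    let tokens := if tokens.head? = some sep then tokens.drop 1 else tokens
    if tokens.getLast? = some sep then tokens.dropLast else tokens

-- ===== PRECONDITION & SPEC =====
def Spec_text_to_tokens_py (text : String) (label_to_index : List (String × Int)) (out : List Int) : Prop := out = text_to_tokens_py_alt text label_to_index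
instance (text : String) (label_to_index : List (String × Int)) (out : List Int) : Decidable (Spec_text_to_tokens_py text label_to_index out) := by unfold Spec_text_to_tokens_py; infer_instance

-- ===== CLAIM (what is proved, stated in full; the proofs are below) =====
def Claim_equal_text_to_tokens_py : Prop := ∀ (text : String) (label_to_index : List (String × Int)), Dom_text_to_tokens_py text label_to_index → Spec_text_to_tokens_py text label_to_index (text_to_tokens_py text label_to_index)

-- ===== LEMMAS AND PROOFS =====

-- a direct structural splitter on ' ' (proof-side mirror of PySem.Chars.splitOn _ [' '])
def pvSpl (cur : List Char) : List Char → List (List Char)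
  | [] => [cur.reverse]
  | c :: rest => if c = ' ' then cur.reverse :: pvSpl [] rest else pvSpl (c :: cur) rest

lemma pvSpl_go (l : List Char) (fuel : Nat) (cur : List Char) (acc : List (List Char))
    (h : l.length < fuel) :
    PySem.Chars.splitOn.go [' '] fuel l cur acc = acc.reverse ++ pvSpl cur l := by
  induction l generalizing fuel cur acc with
  | nil =>
    cases fuel with
    | zero => omega
    | succ f => simp [PySem.Chars.splitOn.go, pvSpl]
  | cons c rest ih =>
    cases fuel with
    | zero => omega
    | succ f =>
      by_cases hc : c = ' '
      · subst hc
        rw [PySem.Chars.splitOn.go]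
        simp only [List.isPrefixOf, BEq.rfl, Bool.true_and, if_true,
          List.length_singleton, List.drop_one, List.tail_cons]
        rw [ih _ _ _ (by simpa using h)]
        simp [pvSpl]
      · rw [PySem.Chars.splitOn.go]
        have : [' '].isPrefixOf (c :: rest) = false := by
          simp [List.isPrefixOf]; exact fun hne => absurd hne.symm hc
        rw [this]
        simp only [Bool.false_eq_true, if_false]
        rw [ih _ _ _ (by simpa using h)]
        simp [pvSpl, hc]

lemma splitOn_eq_pvSpl (l : List Char) : PySem.Chars.splitOn l [' '] = pvSpl [] l := by
  unfold PySem.Chars.splitOn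
  simpa using pvSpl_go l (l.length + 1) [] [] (by omega)

lemma pvSpl_eq_cons (cur l : List Char) :
    pvSpl cur l = (cur.reverse ++ (pvSpl [] l).headD []) :: (pvSpl [] l).tail := by
  induction l generalizing cur with
  | nil => simp [pvSpl]
  | cons c rest ih =>
    by_cases hc : c = ' '
    · subst hc; simp [pvSpl]
    · simp only [pvSpl, hc, if_false]
      rw [ih (c :: cur), ih [c]]
      simp

lemma pvWordTokens_cons (d : PySem.Dict String Int) (c : Char) (w : List Char) :
    pvWordTokens d (c :: w) =
      (if d.contains (String.ofList [c]) then [d.getD (String.ofList [c]) 0] else []) ++ pvWordTokens d w := by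
  by_cases hc : d.contains (String.ofList [c]) <;> simp [pvWordTokens, hc]

-- B's join-fold applied to a nonempty group list
def pvRunB (d : PySem.Dict String Int) (sep : Int) (acc : List Int) : List (List Char) → List Int
  | [] => acc
  | w :: ws => ws.foldl (fun tokens w =>
      (if tokens = [] ∨ tokens.getLast? ≠ some sep then tokens ++ [sep] else tokens)
        ++ pvWordTokens d w) (acc ++ pvWordTokens d w)

-- the core loop correspondence: A's char loop computes B's group join
lemma loopA_eq_runB (d : PySem.Dict String Int) (sep : Int) (l : List Char) (acc : List Int) :
    l.foldl (fun tokens char =>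
      if char = ' ' ∧ (some sep : Option Int).isSome then
        if tokens = [] ∨ PySem.List.pyGet? tokens (-1) ≠ some sep then tokens ++ (some sep).toList else tokens
      else if d.contains (String.ofList [char]) then tokens ++ [d.getD (String.ofList [char]) 0]
      else tokens) acc
    = pvRunB d sep acc (pvSpl [] l) := by
  induction l generalizing acc with
  | nil => simp [pvSpl, pvRunB, pvWordTokens]
  | cons c rest ih =>
    by_cases hc : c = ' '
    · subst hc
      have hget : ∀ (t : List Int), (t = [] ∨ PySem.List.pyGet? t (-1) ≠ some sep)
          ↔ (t = [] ∨ t.getLast? ≠ some sep) := by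
        intro t; cases t with
        | nil => simp
        | cons x xs =>
          simp [PySem.List.pyGet?, PySem.List.pyIdx?, List.getLast?_eq_getElem?]
      rw [List.foldl_cons,
        if_pos (show (' ' = ' ') ∧ ((some sep : Option Int).isSome = true) from ⟨rfl, rfl⟩), ih,
        show pvSpl [] (' ' :: rest) = [] :: pvSpl [] rest from by simp [pvSpl]]
      have hrest := pvSpl_eq_cons [] rest
      simp only [List.reverse_nil, List.nil_append] at hrest
      rw [hrest]
      simp only [pvRunB, List.foldl_cons, pvWordTokens, List.filter_nil, List.map_nil,
        List.append_nil]
      have hstart : (if acc = [] ∨ PySem.List.pyGet? acc (-1) ≠ some sep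
            then acc ++ (some sep : Option Int).toList else acc)
          = (if acc = [] ∨ acc.getLast? ≠ some sep then acc ++ [sep] else acc) := by
        by_cases hd : acc = [] ∨ acc.getLast? ≠ some sep
        · rw [if_pos ((hget acc).mpr hd), if_pos hd]; rfl
        · rw [if_neg (fun h => hd ((hget acc).mp h)), if_neg hd]
      rw [hstart]
    · simp only [List.foldl_cons]
      rw [if_neg (fun h : c = ' ' ∧ ((some sep : Option Int).isSome = true) => hc h.1), ih]
      have hrest := pvSpl_eq_cons [] rest
      simp only [List.reverse_nil, List.nil_append] at hrest
      have hcons : pvSpl [] (c :: rest)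
          = (c :: (pvSpl [] rest).headD []) :: (pvSpl [] rest).tail := by
        have := pvSpl_eq_cons [c] rest
        simp only [pvSpl, hc, if_false, List.reverse_cons, List.reverse_nil, List.nil_append,
          List.singleton_append] at this ⊢
        exact this
      rw [hcons, hrest]
      simp only [pvRunB, pvWordTokens_cons]
      by_cases hin : d.contains (String.ofList [c]) <;> simp [hin, List.append_assoc]

lemma pyGet?_zero_eq_head? (xs : List Int) : PySem.List.pyGet? xs 0 = xs.head? := by
  cases xs <;> simp [PySem.List.pyGet?, PySem.List.pyIdx?]

lemma pyGet?_neg_one_eq_getLast? (xs : List Int) : PySem.List.pyGet? xs (-1) = xs.getLast? := by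
  cases xs with
  | nil => simp [PySem.List.pyGet?, PySem.List.pyIdx?]
  | cons x t =>
    simp [PySem.List.pyGet?, PySem.List.pyIdx?, List.getLast?_eq_getElem?]

lemma slice_one_none (xs : List Int) : PySem.List.slice xs (some 1) none = xs.drop 1 := by
  cases xs with
  | nil => rfl
  | cons x t => simp [PySem.List.slice, PySem.List.clampIdx]

lemma slice_none_neg_one (xs : List Int) : PySem.List.slice xs none (some (-1)) = xs.dropLast := by
  cases xs with
  | nil => rfl
  | cons x t =>
    simp [PySem.List.slice, PySem.List.clampIdx]
    split_ifs with h1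
    · omega
    · rw [List.dropLast_eq_take]
      congr 1

-- A's strip equals B's strip on the same token list (separator present)
lemma strip_eq (sep : Int) (tokens : List Int) :
    (if tokens ≠ [] ∧ ((some sep : Option Int).isSome = true) then
      let tokens2 := if PySem.List.pyGet? tokens 0 = some sep then PySem.List.slice tokens (some 1) none else tokens
      if tokens2 ≠ [] ∧ PySem.List.pyGet? tokens2 (-1) = some sep then PySem.List.slice tokens2 none (some (-1)) else tokens2
    else tokens)
    = (let t1 := if tokens.head? = some sep then tokens.drop 1 else tokens
       if t1.getLast? = some sep then t1.dropLast else t1) := by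
  cases tokens with
  | nil => simp
  | cons x rest =>
    rw [if_pos ⟨by simp, rfl⟩]
    simp only [pyGet?_zero_eq_head?, pyGet?_neg_one_eq_getLast?, slice_one_none,
      slice_none_neg_one]
    have hne : ∀ (l : List Int),
        (if l ≠ [] ∧ l.getLast? = some sep then l.dropLast else l)
          = (if l.getLast? = some sep then l.dropLast else l) := by
      intro l; cases l <;> simp
    by_cases h0 : (x :: rest).head? = some sep
    · rw [if_pos h0]; exact hne _
    · rw [if_neg h0]; exact hne _

-- A's loop when no separator key exists: a plain filtered map
lemma loopA_none (d : PySem.Dict String Int) (l : List Char) (acc : List Int) :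
    l.foldl (fun tokens char =>
      if char = ' ' ∧ ((none : Option Int).isSome = true) then
        if tokens = [] ∨ PySem.List.pyGet? tokens (-1) ≠ (none : Option Int) then tokens ++ (none : Option Int).toList else tokens
      else if d.contains (String.ofList [char]) then tokens ++ [d.getD (String.ofList [char]) 0]
      else tokens) acc = acc ++ pvWordTokens d l := by
  induction l generalizing acc with
  | nil => simp [pvWordTokens]
  | cons c rest ih =>
    rw [List.foldl_cons, if_neg (fun h => by simpa using h.2), ih, pvWordTokens_cons]
    by_cases hin : d.contains (String.ofList [c]) <;> simp [hin]

-- ===== VERDICT (by name: the statement is the Claim_ definition above) =====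
theorem text_to_tokens_py_spec : Claim_equal_text_to_tokens_py := by
  intro text label_to_index _
  unfold Spec_text_to_tokens_py text_to_tokens_py text_to_tokens_py_alt
  cases hsep : (PySem.Dict.mk label_to_index).get? "|" with
  | none =>
    simp only [hsep]
    rw [loopA_none]
    rw [if_neg (fun h => by simpa using h.2)]
    exact (List.nil_append _).symm ▸ rfl
  | some sep =>
    simp only [hsep]
    rw [loopA_eq_runB, splitOn_eq_pvSpl]
    obtain ⟨w, ws, hW⟩ : ∃ w ws, pvSpl [] (PySem.Str.upper text).toList = w :: ws :=
      ⟨_, _, by simpa using pvSpl_eq_cons [] (PySem.Str.upper text).toList⟩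
    rw [hW]
    simp only [pvRunB, List.headD_cons, List.drop_succ_cons, List.drop_zero, List.nil_append]
    exact strip_eq sep _
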